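-- pv_equiv track=rewrite | github.com/remowxdx/AoC-2019 | aoc10.py | get_asteroids_directions
-- ===== SOURCE A (Python) =====
-- import math
--
-- def get_asteroids_directions(pos, asteroids):
--     view_directions = {}
--     for asteroid in asteroids:
--         vd = view_direction(pos, asteroid)
--         if vd not in view_directions:
--             view_directions[vd] = []
--         view_directions[vd].append(asteroid)
--
--     for direction in view_directions:
--         view_directions[direction].sort(key=lambda a: distance_sq(pos, a))
--     return view_directions
--
-- def distance_sq(pos, asteroid):
--     dx = asteroid[0] - pos[0]
--     dy = asteroid[1] - pos[1]
--     return dx * dx + dy * dy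
--
-- def view_direction(fro, to):
--     dx = to[0] - fro[0]
--     dy = to[1] - fro[1]
--     if dx == 0 and dy == 0:
--         return (0, 0)
--     if dx == 0:
--         return (0, dy // abs(dy))
--     if dy == 0:
--         return (dx // abs(dx), 0)
--     gcd = math.gcd(dx, dy)
--     return (dx // gcd, dy // gcd)
-- ===== SOURCE B (Python) =====
-- import math
--
-- def get_asteroids_directions(pos, asteroids):
--     # One global stable sort by distance replaces the per-bucket sorts:
--     # each bucket is then just the in-order selection of its direction.
--     by_dist = sorted(asteroids, key=lambda a: distance_sq(pos, a))
--     return {vd: [a for a in by_dist if view_direction(pos, a) == vd]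
--             for vd in (view_direction(pos, a) for a in asteroids)}
--
-- def distance_sq(pos, asteroid):
--     dx = asteroid[0] - pos[0]
--     dy = asteroid[1] - pos[1]
--     return dx * dx + dy * dy
--
-- def view_direction(fro, to):
--     dx = to[0] - fro[0]
--     dy = to[1] - fro[1]
--     if dx == 0 and dy == 0:
--         return (0, 0)
--     if dx == 0:
--         return (0, dy // abs(dy))
--     if dy == 0:
--         return (dx // abs(dx), 0)
--     gcd = math.gcd(dx, dy)
--     return (dx // gcd, dy // gcd)
-- ===== Notes on version B (the rewrite author's own statement) =====
-- stated objective: alternative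
-- what changed: Instead of grouping first and then sorting each direction bucket separately, B performs one global stable sort of all asteroids by distance and builds the buckets with a dict comprehension as in-order selections from that sorted list, so no per-bucket sort remains.
import Mathlib
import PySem

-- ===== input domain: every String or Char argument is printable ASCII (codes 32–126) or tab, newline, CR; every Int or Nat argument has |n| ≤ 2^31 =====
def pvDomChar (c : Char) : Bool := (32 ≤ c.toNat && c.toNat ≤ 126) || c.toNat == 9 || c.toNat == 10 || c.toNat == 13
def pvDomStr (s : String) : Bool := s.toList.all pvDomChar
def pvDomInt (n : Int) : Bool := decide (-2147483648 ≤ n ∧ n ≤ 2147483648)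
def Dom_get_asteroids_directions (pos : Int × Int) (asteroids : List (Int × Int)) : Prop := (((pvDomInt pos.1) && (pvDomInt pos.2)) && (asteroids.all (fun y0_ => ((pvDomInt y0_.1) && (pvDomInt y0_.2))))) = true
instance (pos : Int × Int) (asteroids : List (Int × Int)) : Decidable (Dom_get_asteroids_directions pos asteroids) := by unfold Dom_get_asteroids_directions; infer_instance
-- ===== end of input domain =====

-- B replaces A's per-direction bucket sorts by ONE global stable sort by distance,
-- then builds each direction's bucket as the in-order selection from that sorted list
-- (objective: alternative decomposition; the return dict is equal, key order included).

-- helper: distance_sq(pos, asteroid)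
def distance_sq (pos asteroid : Int × Int) : Int :=
  let dx := asteroid.1 - pos.1
  let dy := asteroid.2 - pos.2
  dx * dx + dy * dy

-- helper: view_direction(fro, to); math.gcd = Int.gcd (nonnegative), '//' = PySem.Int.floordiv
def view_direction (fro tgt : Int × Int) : Int × Int :=
  let dx := tgt.1 - fro.1
  let dy := tgt.2 - fro.2
  if dx = 0 ∧ dy = 0 then (0, 0)
  else if dx = 0 then (0, PySem.Int.floordiv dy |dy|)
  else if dy = 0 then (PySem.Int.floordiv dx |dx|, 0)
  else
    let gcd : Int := (Int.gcd dx dy : Int)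
    (PySem.Int.floordiv dx gcd, PySem.Int.floordiv dy gcd)

-- ===== PORT A =====
-- first loop: group asteroids by view direction ('if vd not in: …[vd] = []' then append);
-- second loop: sort each bucket in place by distance_sq; returned dict = its items list
def get_asteroids_directions (pos : Int × Int) (asteroids : List (Int × Int)) : List (Int × Int × List (Int × Int)) :=
  let d1 : PySem.Dict (Int × Int) (List (Int × Int)) :=
    asteroids.foldl (fun d a =>
      let vd := view_direction pos a
      let d' := if d.contains vd then d else d.insert vd []
      d'.modify vd [] (fun l => l ++ [a])) PySem.Dict.empty
  let d2 := d1.keys.foldl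
    (fun d k => d.modify k [] (fun l => PySem.List.sorted l (fun a => distance_sq pos a))) d1
  d2.items.map (fun p => (p.1.1, p.1.2, p.2))

-- ===== PORT B =====
-- by_dist = sorted(asteroids, key=distance_sq); dict comprehension over the directions
-- of the asteroids (in input order), each bucket a filter of the globally sorted list
def get_asteroids_directions_alt (pos : Int × Int) (asteroids : List (Int × Int)) : List (Int × Int × List (Int × Int)) :=
  let by_dist := PySem.List.sorted asteroids (fun a => distance_sq pos a)
  ((asteroids.map (fun a => view_direction pos a)).foldl
      (fun d vd => d.insert vd (by_dist.filter (fun a => view_direction pos a == vd)))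
      (PySem.Dict.empty : PySem.Dict (Int × Int) (List (Int × Int)))).items.map
    (fun p => (p.1.1, p.1.2, p.2))

-- ===== PRECONDITION & SPEC =====
def Spec_get_asteroids_directions (pos : Int × Int) (asteroids : List (Int × Int)) (out : List (Int × Int × List (Int × Int))) : Prop := out = get_asteroids_directions_alt pos asteroids
instance (pos : Int × Int) (asteroids : List (Int × Int)) (out : List (Int × Int × List (Int × Int))) : Decidable (Spec_get_asteroids_directions pos asteroids out) := by unfold Spec_get_asteroids_directions; infer_instance

-- ===== CLAIM (what is proved, stated in full; the proofs are below) =====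
def Claim_equal_get_asteroids_directions : Prop := ∀ (pos : Int × Int) (asteroids : List (Int × Int)), Dom_get_asteroids_directions pos asteroids → Spec_get_asteroids_directions pos asteroids (get_asteroids_directions pos asteroids)

-- ===== LEMMAS AND PROOFS =====

-- if every element of l should come after a, insertBy puts a in front
theorem insertBy_of_forall_before {α : Type} (before : α → α → Bool) (a : α) (l : List α)
    (h : ∀ z ∈ l, before a z = true) :
    PySem.List.insertBy before a l = a :: l := by
  cases l with
  | nil => rfl
  | cons y ys => simp [PySem.List.insertBy, h y (by simp)]

-- filtering commutes with stable insertion into an ordered list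
theorem filter_insertBy {α : Type} (key : α → Int) (p : α → Bool) (a : α) (l : List α)
    (h : l.Pairwise (fun u v => key u ≤ key v)) :
    (PySem.List.insertBy (fun u v => decide (key u < key v)) a l).filter p =
      if p a then PySem.List.insertBy (fun u v => decide (key u < key v)) a (l.filter p)
      else l.filter p := by
  induction l with
  | nil => cases hpa : p a <;> simp [PySem.List.insertBy, hpa]
  | cons y ys ih =>
    rcases List.pairwise_cons.mp h with ⟨hy, hys⟩
    by_cases hlt : key a < key y
    · have hall : ∀ z ∈ (y :: ys).filter p, decide (key a < key z) = true := by
        intro z hz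
        rcases List.mem_cons.mp (List.mem_of_mem_filter hz) with rfl | hz'
        · simp [hlt]
        · exact decide_eq_true (lt_of_lt_of_le hlt (hy z hz'))
      rw [PySem.List.insertBy]
      simp only [decide_eq_true_eq, if_pos hlt]
      cases hpa : p a
      · simp [List.filter, hpa]
      · rw [insertBy_of_forall_before _ a _ hall]
        simp [List.filter, hpa]
    · rw [PySem.List.insertBy]
      simp only [decide_eq_true_eq, if_neg hlt]
      cases hpa : p a <;> cases hpy : p y <;>
        simp [List.filter, hpy, hpa, ih hys, PySem.List.insertBy, hlt]

-- one more element on the right is one stable insertion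
theorem sorted_append_singleton {α : Type} (key : α → Int) (xs : List α) (a : α) :
    PySem.List.sorted (xs ++ [a]) key =
      PySem.List.insertBy (fun u v => decide (key u < key v)) a (PySem.List.sorted xs key) := by
  rw [PySem.List.sorted_eq_foldl_insertBy, PySem.List.sorted_eq_foldl_insertBy, List.foldl_append]
  rfl

-- a stable sort commutes with filtering
theorem filter_sorted {α : Type} (key : α → Int) (p : α → Bool) (xs : List α) :
    (PySem.List.sorted xs key).filter p = PySem.List.sorted (xs.filter p) key := by
  induction xs using List.reverseRecOn with
  | nil => rfl
  | append_singleton xs a ih =>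
    rw [sorted_append_singleton, List.filter_append,
      filter_insertBy key p a _ (PySem.List.sorted_pairwise xs key), ih]
    cases hpa : p a
    · simp [List.filter, hpa]
    · have h1 : List.filter p [a] = [a] := by simp [hpa]
      rw [h1, sorted_append_singleton]; simp

-- A's guarded 'setdefault-then-append' step is a plain modify
theorem step_eq_modify {κ ν : Type} [BEq κ] [LawfulBEq κ] (d : PySem.Dict κ ν) (k : κ)
    (d0 : ν) (f : ν → ν) :
    (if d.contains k then d else d.insert k d0).modify k d0 f = d.modify k d0 f := by
  cases hc : d.contains k
  · show (d.insert k d0).insert k (f ((d.insert k d0).getD k d0)) = d.insert k (f (d.getD k d0))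
    rw [PySem.Dict.getD_insert_self, PySem.Dict.insert_insert_self,
      PySem.Dict.getD_of_not_contains d d0 hc]
  · simp

-- folding modify over a Nodup key list: pointwise effect on getD
theorem getD_foldl_modify_nodup {κ ν : Type} [BEq κ] [LawfulBEq κ] [DecidableEq κ]
    (ks : List κ) (g : ν → ν) (d0 : ν) (d : PySem.Dict κ ν) (c : κ) (hnd : ks.Nodup) :
    (ks.foldl (fun d k => d.modify k d0 g) d).getD c d0 =
      if c ∈ ks then g (d.getD c d0) else d.getD c d0 := by
  induction ks generalizing d with
  | nil => simp
  | cons k t ih =>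
    rcases List.nodup_cons.mp hnd with ⟨hk, hnd'⟩
    rw [List.foldl_cons, ih _ hnd']
    by_cases hck : c = k
    · subst hck
      simp [hk, PySem.Dict.getD_modify_self]
    · by_cases hct : c ∈ t <;>
        simp [hct, hck, PySem.Dict.getD_modify_of_ne d d0 g hck]

-- folding insert with a key-determined value: pointwise effect on getD
theorem getD_foldl_insert_fun {κ ν : Type} [BEq κ] [LawfulBEq κ] [DecidableEq κ]
    (l : List κ) (g : κ → ν) (d0 : ν) (d : PySem.Dict κ ν) (c : κ) :
    (l.foldl (fun d k => d.insert k (g k)) d).getD c d0 =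
      if c ∈ l then g c else d.getD c d0 := by
  induction l generalizing d with
  | nil => simp
  | cons k t ih =>
    rw [List.foldl_cons, ih]
    by_cases hct : c ∈ t
    · simp [hct]
    · by_cases hck : c = k <;> simp [hct, hck, PySem.Dict.getD_insert]

-- folding modify over keys the dict already has does not change the key list
theorem keys_foldl_modify_mem {κ ν : Type} [BEq κ] [LawfulBEq κ]
    (ks : List κ) (g : ν → ν) (d0 : ν) (d : PySem.Dict κ ν)
    (h : ∀ k ∈ ks, d.contains k = true) :
    (ks.foldl (fun d k => d.modify k d0 g) d).keys = d.keys := by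
  induction ks generalizing d with
  | nil => rfl
  | cons k t ih =>
    have hk := h k (by simp)
    rw [List.foldl_cons, ih]
    · rw [PySem.Dict.keys_modify, PySem.Dict.keys_insert_of_contains _ _ hk]
    · intro k' hk'
      rw [PySem.Dict.contains_modify]
      simp [h k' (List.mem_cons_of_mem _ hk')]

theorem get_asteroids_directions_eq (pos : Int × Int) (asteroids : List (Int × Int)) :
    get_asteroids_directions pos asteroids = get_asteroids_directions_alt pos asteroids := by
  unfold get_asteroids_directions get_asteroids_directions_alt
  set vdf := fun a => view_direction pos a with hvdf
  set dist := fun a : Int × Int => distance_sq pos a with hdist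
  -- A's first loop, with the guard removed
  have hstep : (fun (d : PySem.Dict (Int × Int) (List (Int × Int))) a =>
      (if d.contains (vdf a) then d else d.insert (vdf a) []).modify (vdf a) [] (fun l => l ++ [a]))
      = fun d a => d.modify (vdf a) [] (fun l => l ++ [a]) := by
    funext d a; exact step_eq_modify d (vdf a) [] (fun l => l ++ [a])
  show (((asteroids.foldl (fun d a =>
      (if d.contains (vdf a) then d else d.insert (vdf a) []).modify (vdf a) [] (fun l => l ++ [a]))
      PySem.Dict.empty).keys.foldl (fun d k => d.modify k [] (fun l => PySem.List.sorted l dist))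
      (asteroids.foldl (fun d a =>
      (if d.contains (vdf a) then d else d.insert (vdf a) []).modify (vdf a) [] (fun l => l ++ [a]))
      PySem.Dict.empty)).items.map (fun p => (p.1.1, p.1.2, p.2)))
    = ((asteroids.map vdf).foldl
        (fun d vd => d.insert vd ((PySem.List.sorted asteroids dist).filter (fun a => vdf a == vd)))
        (PySem.Dict.empty : PySem.Dict (Int × Int) (List (Int × Int)))).items.map
        (fun p => (p.1.1, p.1.2, p.2))
  rw [hstep]
  set d1 := asteroids.foldl (fun d a => d.modify (vdf a) [] (fun l => l ++ [a]))
    PySem.Dict.empty with hd1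
  set dB := (asteroids.map vdf).foldl
      (fun d vd => d.insert vd ((PySem.List.sorted asteroids dist).filter (fun a => vdf a == vd)))
      (PySem.Dict.empty : PySem.Dict (Int × Int) (List (Int × Int))) with hdB
  -- keys of d1
  have hkeys1 : d1.keys = PySem.Set.ofList (asteroids.map vdf) := by
    have h := PySem.Dict.keys_foldl_modify_key asteroids vdf ([] : List (Int × Int))
      (fun _ a => fun l => l ++ [a]) PySem.Dict.empty
    rw [hd1]
    simpa [PySem.Set.update_nil_left] using h
  have hnd1 : d1.keys.Nodup := by
    rw [hkeys1]; exact PySem.Set.nodup_ofList _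
  -- keys of dB
  have hkeysB : dB.keys = PySem.Set.ofList (asteroids.map vdf) := by
    have h := PySem.Dict.keys_foldl_insert (asteroids.map vdf)
      (fun _ vd => (PySem.List.sorted asteroids dist).filter (fun a => vdf a == vd))
      PySem.Dict.empty
    rw [hdB]
    simpa [PySem.Set.update_nil_left] using h
  have hndB : dB.keys.Nodup := by
    rw [hkeysB]; exact PySem.Set.nodup_ofList _
  set d2 := d1.keys.foldl (fun d k => d.modify k [] (fun l => PySem.List.sorted l dist)) d1 with hd2
  -- keys of d2
  have hkeys2 : d2.keys = d1.keys := by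
    apply keys_foldl_modify_mem
    intro k hk
    rw [PySem.Dict.contains_iff_mem_keys]; exact hk
  have hnd2 : d2.keys.Nodup := by rw [hkeys2]; exact hnd1
  -- per-key values of d1
  have hgetD1 : ∀ c, d1.getD c [] = asteroids.filter (fun a => vdf a == c) := by
    intro c
    have hmap : d1 = (asteroids.map (fun a => (vdf a, a))).foldl
        (fun d p => d.modify p.1 [] (fun l => l ++ [p.2])) PySem.Dict.empty := by
      rw [hd1, List.foldl_map]
    rw [hmap, PySem.Dict.getD_foldl_modify_append]
    simp [List.filter_map, Function.comp_def]
  -- per-key values of d2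
  have hgetD2 : ∀ c ∈ d1.keys, d2.getD c [] =
      PySem.List.sorted (asteroids.filter (fun a => vdf a == c)) dist := by
    intro c hc
    rw [hd2, getD_foldl_modify_nodup _ _ _ _ _ hnd1, if_pos hc, hgetD1]
  -- per-key values of dB
  have hgetDB : ∀ c ∈ asteroids.map vdf, dB.getD c [] =
      PySem.List.sorted (asteroids.filter (fun a => vdf a == c)) dist := by
    intro c hc
    rw [hdB, getD_foldl_insert_fun, if_pos hc, filter_sorted]
  -- assemble: both items lists are keys.map (k ↦ (k, value at k))
  suffices h : d2.items = dB.items by rw [h]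
  rw [PySem.Dict.items_eq_map_keys d2 hnd2 [], PySem.Dict.items_eq_map_keys dB hndB [],
    hkeys2, hkeys1, hkeysB]
  apply List.map_congr_left
  intro k hk
  have hkmem : k ∈ asteroids.map vdf := (PySem.Set.mem_ofList _ _).mp hk
  rw [hgetD2 k (by rw [hkeys1]; exact hk), hgetDB k hkmem]

-- ===== VERDICT (by name: the statement is the Claim_ definition above) =====
theorem get_asteroids_directions_spec : Claim_equal_get_asteroids_directions := by
  intro pos asteroids _
  unfold Spec_get_asteroids_directions
  exact get_asteroids_directions_eq pos asteroids
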